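-- pv_equiv track=rewrite | github.com/DoctorN8/gse-telemetry-control-simulator | rag/rag_assistant.py | _extract_relevant_info
-- ===== SOURCE A (Python) =====
-- def _extract_relevant_info(context: str, question: str) -> str:
--     keywords = [word.lower() for word in question.split() if len(word) > 3]
--
--     lines = context.split('\n')
--     scored_lines = []
--
--     for i, line in enumerate(lines):
--         score = sum(1 for keyword in keywords if keyword in line.lower())
--         if score > 0:
--             scored_lines.append((score, i, line))
--
--     scored_lines.sort(reverse=True)
--
--     if scored_lines:
--         relevant_indices = sorted([idx for _, idx, _ in scored_lines[:10]])
--         result = []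
--         for idx in relevant_indices:
--             result.append(lines[idx])
--         return '\n'.join(result).strip()
--
--     return context[:1000] + "..." if len(context) > 1000 else context
-- ===== SOURCE B (Python) =====
-- def _extract_relevant_info(context: str, question: str) -> str:
--     keywords = [word.lower() for word in question.split() if len(word) > 3]
--
--     lines = context.split('\n')
--     scores = [sum(1 for keyword in keywords if keyword in line.lower()) for line in lines]
--
--     # Rank-based selection: keep a line iff fewer than 10 other lines beat it on
--     # (score, index); no sorting anywhere, output is built in one index-ordered pass.
--     result = []
--     for i, s in enumerate(scores):
--         if s > 0:
--             rank = sum(1 for j, t in enumerate(scores) if t > s or (t == s and j > i))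
--             if rank < 10:
--                 result.append(lines[i])
--
--     if result:
--         return '\n'.join(result).strip()
--
--     return context[:1000] + "..." if len(context) > 1000 else context
-- ===== Notes on version B (the rewrite author's own statement) =====
-- stated objective: alternative
-- what changed: Replaces sort(reverse=True) + [:10] + second sort of the indices by sort-free rank selection: a line is kept iff fewer than 10 lines beat it on the (score, index) ordering, and the output is emitted in one index-ordered pass.
import Mathlib
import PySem

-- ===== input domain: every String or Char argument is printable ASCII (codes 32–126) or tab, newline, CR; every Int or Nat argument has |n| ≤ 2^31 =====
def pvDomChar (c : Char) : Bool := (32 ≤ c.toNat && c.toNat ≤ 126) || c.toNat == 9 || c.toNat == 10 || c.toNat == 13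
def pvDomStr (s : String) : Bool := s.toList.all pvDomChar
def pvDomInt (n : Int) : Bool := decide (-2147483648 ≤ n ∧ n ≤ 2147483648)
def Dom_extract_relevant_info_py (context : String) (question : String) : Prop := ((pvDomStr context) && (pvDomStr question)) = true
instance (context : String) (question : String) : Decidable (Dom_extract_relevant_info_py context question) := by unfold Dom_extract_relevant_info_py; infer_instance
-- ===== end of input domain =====

-- B replaces A's sort(reverse=True) + [:10] + sort of the indices by sort-free rank
-- selection (keep a line iff fewer than 10 lines beat it on (score, index)); same output.

-- ===== PORT A =====
-- Python sorts triples (score, i, line); the indices i are pairwise distinct, so the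
-- third tuple component never participates in the comparison: sorted2 on the first
-- two components is exact here.
def extract_relevant_info_py (context : String) (question : String) : String :=
  let keywords := ((PySem.Str.split₀ question).filter (fun w => 3 < PySem.Str.len w)).map
      (fun w => PySem.Str.lower w)
  let lines := (PySem.Str.split? context "\n").getD []
  let scored := (PySem.List.enumerate lines 0).foldl
    (fun acc p =>
      let score := (keywords.map (fun k => if PySem.Str.isIn k (PySem.Str.lower p.2) then (1 : Int) else 0)).sum
      if 0 < score then acc ++ [(score, p.1, p.2)] else acc)
    ([] : List (Int × Int × String))
  let sortedScored := PySem.List.sorted2 scored (fun t => t.1) (fun t => t.2.1) true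
  if sortedScored ≠ [] then
    let relevant := PySem.List.sorted ((PySem.List.slice sortedScored none (some 10)).map (fun t => t.2.1)) (fun x => x)
    let result := relevant.foldl (fun acc idx => acc ++ [PySem.List.pyGetD lines idx ""]) []
    PySem.Str.strip (PySem.Str.join "\n" result)
  else
    if 1000 < PySem.Str.len context then PySem.Str.slice context none (some 1000) ++ "..." else context

-- ===== PORT B =====
def extract_relevant_info_py_alt (context : String) (question : String) : String :=
  let keywords := ((PySem.Str.split₀ question).filter (fun w => 3 < PySem.Str.len w)).map
      (fun w => PySem.Str.lower w)
  let lines := (PySem.Str.split? context "\n").getD []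
  let scores := lines.map
      (fun line => (keywords.map (fun k => if PySem.Str.isIn k (PySem.Str.lower line) then (1 : Int) else 0)).sum)
  let result := (PySem.List.enumerate scores 0).foldl
    (fun acc p =>
      if 0 < p.2 then
        let rank := ((PySem.List.enumerate scores 0).map
            (fun q => if p.2 < q.2 || (q.2 == p.2 && p.1 < q.1) then (1 : Int) else 0)).sum
        if rank < 10 then acc ++ [PySem.List.pyGetD lines p.1 ""] else acc
      else acc)
    ([] : List String)
  if result ≠ [] then PySem.Str.strip (PySem.Str.join "\n" result)
  else
    if 1000 < PySem.Str.len context then PySem.Str.slice context none (some 1000) ++ "..." else context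

-- ===== PRECONDITION & SPEC =====
def Spec_extract_relevant_info_py (context : String) (question : String) (out : String) : Prop := out = extract_relevant_info_py_alt context question
instance (context : String) (question : String) (out : String) : Decidable (Spec_extract_relevant_info_py context question out) := by unfold Spec_extract_relevant_info_py; infer_instance

-- ===== CLAIM (what is proved, stated in full; the proofs are below) =====
def Claim_equal_extract_relevant_info_py : Prop := ∀ (context : String) (question : String), Dom_extract_relevant_info_py context question → Spec_extract_relevant_info_py context question (extract_relevant_info_py context question)

-- ===== LEMMAS AND PROOFS =====

-- The part of A after the shared scoring: sort desc, take 10, sort the indices, fetch lines.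
def pvScored (lines : List String) (sc : String → Int) : List (Int × Int × String) :=
  (PySem.List.enumerate lines 0).foldl
    (fun acc p => if 0 < sc p.2 then acc ++ [(sc p.2, p.1, p.2)] else acc) []

def pvRenderA (lines : List String) (sc : String → Int) : List String :=
  (PySem.List.sorted
      ((PySem.List.slice (PySem.List.sorted2 (pvScored lines sc) (fun t => t.1) (fun t => t.2.1) true) none (some 10)).map
        (fun t => t.2.1)) (fun x => x)).foldl
    (fun acc idx => acc ++ [PySem.List.pyGetD lines idx ""]) []

-- The part of B after the shared scoring: rank-filter pass.
def pvResultB (lines : List String) (sc : String → Int) : List String :=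
  (PySem.List.enumerate (lines.map sc) 0).foldl
    (fun acc p =>
      if 0 < p.2 then
        if ((PySem.List.enumerate (lines.map sc) 0).map
            (fun q => if p.2 < q.2 || (q.2 == p.2 && p.1 < q.1) then (1 : Int) else 0)).sum < 10
        then acc ++ [PySem.List.pyGetD lines p.1 ""] else acc
      else acc) []

def pvG (sc : String → Int) : Int × String → Int × Int × String := fun p => (sc p.2, p.1, p.2)
def pvC (sc : String → Int) : Int × String → Bool := fun p => decide (0 < sc p.2)
def pvL (lines : List String) (sc : String → Int) : List (Int × Int × String) :=
  ((PySem.List.enumerate lines 0).filter (pvC sc)).map (pvG sc)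
def pvKey (N : Int) (t : Int × Int × String) : Int := t.1 * N + t.2.1
def pvPr (lines : List String) (sc : String → Int) : Int × Int × String → Bool :=
  fun t => decide ((pvL lines sc).countP
    (fun u => decide (pvKey (lines.length : Int) t < pvKey (lines.length : Int) u)) < 10)

lemma pvLexInt (N a x b y : Int) (hx0 : 0 ≤ x) (hxN : x < N) (hy0 : 0 ≤ y) (hyN : y < N) :
    a * N + x < b * N + y ↔ (a < b ∨ (a = b ∧ x < y)) := by
  constructor
  · intro h
    rcases lt_trichotomy a b with hab | hab | hab
    · exact Or.inl hab
    · exact Or.inr ⟨hab, by rw [hab] at h; linarith⟩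
    · exfalso
      have h1 : b + 1 ≤ a := by omega
      have h2 : (b + 1) * N ≤ a * N := mul_le_mul_of_nonneg_right h1 (by omega)
      rw [add_mul, one_mul] at h2
      linarith
  · rintro (hab | ⟨hab, hxy⟩)
    · have h1 : a + 1 ≤ b := by omega
      have h2 : (a + 1) * N ≤ b * N := mul_le_mul_of_nonneg_right h1 (by omega)
      rw [add_mul, one_mul] at h2
      linarith
    · rw [hab]; linarith

lemma pvEnumMap {α β : Type} (f : α → β) :
    ∀ (xs : List α) (s : Int),
      PySem.List.enumerate (xs.map f) s = (PySem.List.enumerate xs s).map (fun p => (p.1, f p.2)) := by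
  intro xs
  induction xs with
  | nil => intro s; rfl
  | cons x xs ih => intro s; simp [PySem.List.enumerate_cons, ih]

lemma pvInsertByCongr {α : Type} (f g : α → α → Bool) (S : List α)
    (h : ∀ a ∈ S, ∀ b ∈ S, f a b = g a b) (x : α) (hx : x ∈ S) :
    ∀ (acc : List α), (∀ y ∈ acc, y ∈ S) →
      PySem.List.insertBy f x acc = PySem.List.insertBy g x acc := by
  intro acc
  induction acc with
  | nil => intro _; rfl
  | cons y ys ih =>
    intro hacc
    have hy : y ∈ S := hacc y (by simp)
    simp only [PySem.List.insertBy]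
    rw [h x hx y hy]
    by_cases hfg : g x y = true
    · simp [hfg]
    · simp only [Bool.not_eq_true] at hfg
      simp [hfg, ih (fun z hz => hacc z (by simp [hz]))]

lemma pvFoldlInsertByCongr {α : Type} (f g : α → α → Bool) (S : List α)
    (h : ∀ a ∈ S, ∀ b ∈ S, f a b = g a b) :
    ∀ (l acc : List α), (∀ y ∈ l, y ∈ S) → (∀ y ∈ acc, y ∈ S) →
      l.foldl (fun acc x => PySem.List.insertBy f x acc) acc
        = l.foldl (fun acc x => PySem.List.insertBy g x acc) acc := by
  intro l
  induction l with
  | nil => intro acc _ _; rfl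
  | cons x xs ih =>
    intro acc hl hacc
    have hx : x ∈ S := hl x (by simp)
    simp only [List.foldl_cons]
    rw [pvInsertByCongr f g S h x hx acc hacc]
    exact ih _ (fun y hy => hl y (by simp [hy])) (fun y hy => by
      rcases (PySem.List.mem_insertBy _ x y acc).mp hy with h1 | h1
      · exact h1 ▸ hx
      · exact hacc y h1)

lemma pvMemTake {α : Type} (key : α → Int) :
    ∀ (T : List α) (m : Nat) (x : α), T.Pairwise (fun a b => key b < key a) →
      (x ∈ T.take m ↔ x ∈ T ∧ T.countP (fun y => decide (key x < key y)) < m) := by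
  intro T
  induction T with
  | nil => simp
  | cons a T ih =>
    intro m x hpw
    rcases List.pairwise_cons.mp hpw with ⟨ha, hT⟩
    cases m with
    | zero => simp
    | succ m =>
      rw [List.take_succ_cons]
      by_cases hxa : x = a
      · subst hxa
        have hc : T.countP (fun y => decide (key x < key y)) = 0 :=
          List.countP_eq_zero.mpr (fun y hy => by
            simp only [decide_eq_true_eq]
            exact not_lt.mpr (le_of_lt (ha y hy)))
        simp [hc]
      · by_cases hxT : x ∈ T
        · have hkxa : key x < key a := ha x hxT
          have hpa : (decide (key x < key a)) = true := by simpa using hkxa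
          rw [List.mem_cons, List.mem_cons]
          simp only [hxa, false_or]
          rw [ih m x hT]
          simp [hpa, hxT]
        · have hnt : x ∉ T.take m := fun hmem => hxT (List.mem_of_mem_take hmem)
          simp [hxa, hxT, hnt]

lemma pvSorted2Foldl {α : Type} (xs : List α) (k1 : α → Int) (k2 : α → Int) :
    PySem.List.sorted2 xs k1 k2 true
      = xs.foldl (fun acc x => PySem.List.insertBy
          (fun a b => decide (k1 b < k1 a) || (!decide (k1 a < k1 b) && decide (k2 b < k2 a))) x acc) [] := rfl

lemma pvFoldlNestedIf {α β : Type} (c1 : α → Prop) [DecidablePred c1] (c2 : α → Prop)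
    [DecidablePred c2] (f : α → β) (l : List α) :
    l.foldl (fun acc p => if c1 p then (if c2 p then acc ++ [f p] else acc) else acc) []
      = (l.filter (fun p => decide (c1 p) && decide (c2 p))).map f := by
  have h : (fun (acc : List β) p => if c1 p then (if c2 p then acc ++ [f p] else acc) else acc)
      = (fun acc p => if (fun p => decide (c1 p) && decide (c2 p)) p = true then acc ++ [f p] else acc) := by
    funext acc p
    by_cases h1 : c1 p <;> by_cases h2 : c2 p <;> simp [h1, h2]
  rw [h, PySem.List.foldl_append_if]
  simp

lemma pvScoredEq (lines : List String) (sc : String → Int) :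
    pvScored lines sc = pvL lines sc := by
  unfold pvScored pvL pvC pvG
  have h : (fun (acc : List (Int × Int × String)) (p : Int × String) =>
        if 0 < sc p.2 then acc ++ [(sc p.2, p.1, p.2)] else acc)
      = (fun acc p => if (fun p : Int × String => decide (0 < sc p.2)) p = true
          then acc ++ [(fun p : Int × String => (sc p.2, p.1, p.2)) p] else acc) := by
    funext acc p
    by_cases h1 : 0 < sc p.2 <;> simp [h1]
  rw [h, PySem.List.foldl_append_if]
  simp

lemma pvLBound (lines : List String) (sc : String → Int) :
    ∀ t ∈ pvL lines sc, 0 < t.1 ∧ 0 ≤ t.2.1 ∧ t.2.1 < (lines.length : Int) := by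
  intro t ht
  rcases List.mem_map.mp ht with ⟨p, hpf, rfl⟩
  rcases List.mem_filter.mp hpf with ⟨hpE, hpc⟩
  rcases (PySem.List.mem_enumerate_iff _ _ _).mp hpE with ⟨k, hk, rfl⟩
  refine ⟨by simpa [pvG, pvC] using hpc, ?_, ?_⟩
  · show (0 : Int) ≤ 0 + (k : Int); omega
  · show (0 : Int) + (k : Int) < (lines.length : Int); omega

lemma pvLLex (lines : List String) (sc : String → Int) :
    ∀ a ∈ pvL lines sc, ∀ b ∈ pvL lines sc,
      (pvKey (lines.length : Int) a < pvKey (lines.length : Int) b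
        ↔ (a.1 < b.1 ∨ (a.1 = b.1 ∧ a.2.1 < b.2.1))) := by
  intro a ha b hb
  have Ba := pvLBound lines sc a ha
  have Bb := pvLBound lines sc b hb
  exact pvLexInt (lines.length : Int) a.1 a.2.1 b.1 b.2.1 Ba.2.1 Ba.2.2 Bb.2.1 Bb.2.2

lemma pvLIdx (lines : List String) (sc : String → Int) :
    (pvL lines sc).Pairwise (fun a b => a.2.1 < b.2.1) := by
  have h1 := PySem.List.pairwise_lt_enumerate lines 0
  have h2 := h1.filter (pvC sc)
  exact h2.map (pvG sc) (fun a b hab => by simpa [pvG] using hab)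

lemma pvLNodup (lines : List String) (sc : String → Int) : (pvL lines sc).Nodup :=
  (pvLIdx lines sc).imp (fun hab => ne_of_apply_ne (fun t => t.2.1) (ne_of_lt hab))

lemma pvLKeyInj (lines : List String) (sc : String → Int) :
    ∀ a ∈ pvL lines sc, ∀ b ∈ pvL lines sc,
      pvKey (lines.length : Int) a = pvKey (lines.length : Int) b → a = b := by
  intro a ha b hb hk
  by_contra hne
  have hidxne : (pvL lines sc).Pairwise (fun a b => a.2.1 ≠ b.2.1) :=
    (pvLIdx lines sc).imp (fun hab => ne_of_lt hab)
  have hne' : a.2.1 ≠ b.2.1 :=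
    hidxne.forall (fun x y h => Ne.symm h) ha hb hne
  have hnab : ¬ pvKey (lines.length : Int) a < pvKey (lines.length : Int) b := by
    rw [hk]; exact lt_irrefl _
  have hnba : ¬ pvKey (lines.length : Int) b < pvKey (lines.length : Int) a := by
    rw [hk]; exact lt_irrefl _
  rw [pvLLex lines sc a ha b hb] at hnab
  rw [pvLLex lines sc b hb a ha] at hnba
  push Not at hnab hnba
  omega

lemma pvDescEq (lines : List String) (sc : String → Int) :
    PySem.List.sorted2 (pvL lines sc) (fun t => t.1) (fun t => t.2.1) true
      = PySem.List.sorted (pvL lines sc) (pvKey (lines.length : Int)) true := by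
  rw [PySem.List.sorted_rev_eq_foldl_insertBy, pvSorted2Foldl]
  apply pvFoldlInsertByCongr _ _ (pvL lines sc) _ _ [] (fun y hy => hy) (by simp)
  intro a ha b hb
  have h2 : decide (pvKey (lines.length : Int) b < pvKey (lines.length : Int) a)
      = decide (b.1 < a.1 ∨ (b.1 = a.1 ∧ b.2.1 < a.2.1)) :=
    decide_eq_decide.mpr (pvLLex lines sc b hb a ha)
  rw [h2]
  rcases lt_trichotomy a.1 b.1 with h | h | h
  · simp [show ¬ b.1 < a.1 from not_lt.mpr h.le, h, show b.1 ≠ a.1 from ne_of_gt h]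
  · simp [h]
  · simp [h]

lemma pvDescPw (lines : List String) (sc : String → Int) :
    (PySem.List.sorted (pvL lines sc) (pvKey (lines.length : Int)) true).Pairwise
      (fun a b => pvKey (lines.length : Int) b < pvKey (lines.length : Int) a) := by
  have hperm := PySem.List.sorted_perm (pvL lines sc) (pvKey (lines.length : Int)) true
  have h1 := PySem.List.sorted_pairwise_rev (pvL lines sc) (pvKey (lines.length : Int))
  have h2 : (PySem.List.sorted (pvL lines sc) (pvKey (lines.length : Int)) true).Nodup :=
    hperm.nodup_iff.mpr (pvLNodup lines sc)
  refine (h1.and h2).imp_of_mem (fun {a b} hma hmb hab => ?_)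
  refine lt_of_le_of_ne hab.1 (fun hk => ?_)
  exact hab.2 ((pvLKeyInj lines sc b (hperm.mem_iff.mp hmb) a (hperm.mem_iff.mp hma) hk).symm)

lemma pvPerm10 (lines : List String) (sc : String → Int) :
    ((PySem.List.sorted (pvL lines sc) (pvKey (lines.length : Int)) true).take 10).Perm
      ((pvL lines sc).filter (pvPr lines sc)) := by
  have hperm := PySem.List.sorted_perm (pvL lines sc) (pvKey (lines.length : Int)) true
  have hDnd : (PySem.List.sorted (pvL lines sc) (pvKey (lines.length : Int)) true).Nodup :=
    hperm.nodup_iff.mpr (pvLNodup lines sc)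
  rw [List.perm_ext_iff_of_nodup ((List.take_sublist _ _).nodup hDnd)
    ((pvLNodup lines sc).filter _)]
  intro x
  rw [pvMemTake (pvKey (lines.length : Int)) _ 10 x (pvDescPw lines sc), List.mem_filter]
  rw [hperm.mem_iff, hperm.countP_eq]
  unfold pvPr
  simp

theorem pvAListEq (lines : List String) (sc : String → Int) :
    pvRenderA lines sc
      = ((pvL lines sc).filter (pvPr lines sc)).map (fun t => PySem.List.pyGetD lines t.2.1 "") := by
  unfold pvRenderA
  rw [pvScoredEq, pvDescEq]
  rw [PySem.List.slice_to _ (by norm_num : (0:Int) ≤ 10)]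
  have hsorted : PySem.List.sorted
      (((PySem.List.sorted (pvL lines sc) (pvKey (lines.length : Int)) true).take (10:Int).toNat).map
        (fun t => t.2.1)) (fun x => x)
      = ((pvL lines sc).filter (pvPr lines sc)).map (fun t => t.2.1) := by
    apply PySem.List.sorted_eq_of_perm_of_pairwise_lt
    · exact ((pvPerm10 lines sc).map (fun t => t.2.1)).symm
    · have hf := (pvLIdx lines sc).filter (pvPr lines sc)
      exact List.Pairwise.map (R := fun (a b : Int × Int × String) => a.2.1 < b.2.1)
        (S := fun (a b : Int) => a < b) (fun t => t.2.1) (fun a b hab => hab) hf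
  rw [hsorted, PySem.List.foldl_append_singleton_eq_map, List.nil_append, List.map_map]
  rfl

theorem pvResultBEq (lines : List String) (sc : String → Int) :
    pvResultB lines sc
      = ((pvL lines sc).filter (pvPr lines sc)).map (fun t => PySem.List.pyGetD lines t.2.1 "") := by
  unfold pvResultB
  rw [pvEnumMap sc lines 0]
  rw [pvFoldlNestedIf (fun p : Int × Int => 0 < p.2)
      (fun p : Int × Int =>
        (((PySem.List.enumerate lines 0).map (fun p => (p.1, sc p.2))).map
          (fun q => if p.2 < q.2 || (q.2 == p.2 && p.1 < q.1) then (1 : Int) else 0)).sum < 10)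
      (fun p => PySem.List.pyGetD lines p.1 "")]
  unfold pvL
  rw [List.filter_map, List.map_map, List.filter_map, List.map_map, List.filter_filter]
  congr 1
  apply List.filter_congr
  intro p hp
  show (decide (0 < sc p.2) && _) = (pvPr lines sc (pvG sc p) && pvC sc p)
  by_cases hc : 0 < sc p.2
  · -- both start with a true conjunct; compare the rank conditions
    have hgp : pvG sc p ∈ pvL lines sc :=
      List.mem_map_of_mem (List.mem_filter.mpr ⟨hp, by simp [pvC, hc]⟩)
    have hsum : (((PySem.List.enumerate lines 0).map (fun p => (p.1, sc p.2))).map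
          (fun q => if sc p.2 < q.2 || (q.2 == sc p.2 && p.1 < q.1) then (1 : Int) else 0)).sum
        = ((PySem.List.enumerate lines 0).countP
            (fun q => sc p.2 < sc q.2 || (sc q.2 == sc p.2 && p.1 < q.1)) : Int) := by
      rw [List.map_map]
      exact PySem.List.sum_map_ite_one_zero _ _
    have hcount : (PySem.List.enumerate lines 0).countP
          (fun q => sc p.2 < sc q.2 || (sc q.2 == sc p.2 && p.1 < q.1))
        = (pvL lines sc).countP
            (fun u => decide (pvKey (lines.length : Int) (pvG sc p) < pvKey (lines.length : Int) u)) := by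
      unfold pvL
      rw [List.countP_map, List.countP_filter]
      apply List.countP_congr
      intro q hq
      by_cases hcq : 0 < sc q.2
      · have hgq : pvG sc q ∈ pvL lines sc :=
          List.mem_map_of_mem (List.mem_filter.mpr ⟨hq, by simp [pvC, hcq]⟩)
        have hlx := pvLLex lines sc (pvG sc p) hgp (pvG sc q) hgq
        simp only [pvG, pvC, Function.comp] at hlx ⊢
        simp only [Bool.or_eq_true, Bool.and_eq_true, beq_iff_eq, decide_eq_true_eq, hlx]
        constructor
        · rintro (h | ⟨h1, h2⟩)
          · exact ⟨Or.inl h, hcq⟩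
          · exact ⟨Or.inr ⟨h1.symm, h2⟩, hcq⟩
        · rintro ⟨h | ⟨h1, h2⟩, _⟩
          · exact Or.inl h
          · exact Or.inr ⟨h1.symm, h2⟩
      · simp only [pvG, pvC, Function.comp]
        simp only [Bool.or_eq_true, Bool.and_eq_true, beq_iff_eq, decide_eq_true_eq]
        constructor
        · rintro (h | ⟨h1, h2⟩)
          · exact absurd (lt_trans hc h) hcq
          · exact absurd (h1 ▸ hc) hcq
        · rintro ⟨_, h⟩
          exact absurd h hcq
    unfold pvPr pvC
    rw [Bool.and_comm (decide _)]
    congr 1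
    rw [decide_eq_decide]
    rw [hsum, hcount]
    constructor
    · intro h; exact_mod_cast h
    · intro h; exact_mod_cast h
  · simp [pvC, hc]

theorem pvListsEq (lines : List String) (sc : String → Int) :
    pvRenderA lines sc = pvResultB lines sc :=
  (pvAListEq lines sc).trans (pvResultBEq lines sc).symm

theorem pvNonemptyIff (lines : List String) (sc : String → Int) :
    (PySem.List.sorted2 (pvScored lines sc) (fun t => t.1) (fun t => t.2.1) true = [])
      ↔ pvResultB lines sc = [] := by
  rw [pvScoredEq, pvResultBEq]
  have hperm := PySem.List.sorted2_perm (pvL lines sc) (fun t : Int × Int × String => t.1)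
    (fun t : Int × Int × String => t.2.1) true
  constructor
  · intro h
    have hL : pvL lines sc = [] := by
      have := hperm.length_eq
      rw [h] at this
      exact List.length_eq_zero_iff.mp this.symm
    rw [hL]
    rfl
  · intro h
    rw [List.map_eq_nil_iff] at h
    by_contra hne
    have hLne : pvL lines sc ≠ [] := by
      intro hL
      apply hne
      rw [hL]
      rfl
    obtain ⟨m, hm⟩ : ∃ m, PySem.List.max? (pvL lines sc) (pvKey (lines.length : Int)) = some m := by
      cases hmx : PySem.List.max? (pvL lines sc) (pvKey (lines.length : Int)) with
      | none => exact absurd ((PySem.List.max?_eq_none_iff _ _).mp hmx) hLne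
      | some m => exact ⟨m, rfl⟩
    have hmem : m ∈ pvL lines sc := PySem.List.max?_mem hm
    have hmax := PySem.List.max?_isMax hm
    have hprm : pvPr lines sc m = true := by
      unfold pvPr
      have hz : (pvL lines sc).countP
          (fun u => decide (pvKey (lines.length : Int) m < pvKey (lines.length : Int) u)) = 0 :=
        List.countP_eq_zero.mpr (fun y hy => by
          simp only [decide_eq_true_eq]
          exact not_lt.mpr (hmax y hy))
      simp [hz]
    have : m ∈ (pvL lines sc).filter (pvPr lines sc) := List.mem_filter.mpr ⟨hmem, hprm⟩
    rw [h] at this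
    exact absurd this (List.not_mem_nil)

theorem pvCore (lines : List String) (sc : String → Int) (fb : String) :
    (let scored := pvScored lines sc
     let ss := PySem.List.sorted2 scored (fun t => t.1) (fun t => t.2.1) true
     if ss ≠ [] then PySem.Str.strip (PySem.Str.join "\n" (pvRenderA lines sc)) else fb)
    = (let result := pvResultB lines sc
       if result ≠ [] then PySem.Str.strip (PySem.Str.join "\n" result) else fb) := by
  simp only []
  by_cases h : PySem.List.sorted2 (pvScored lines sc) (fun t => t.1) (fun t => t.2.1) true = []
  · rw [if_neg (by simp [h]), if_neg (by simp [(pvNonemptyIff lines sc).mp h])]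
  · have h2 : ¬ pvResultB lines sc = [] := fun hh => h ((pvNonemptyIff lines sc).mpr hh)
    rw [if_pos h, if_pos h2, pvListsEq]

-- ===== VERDICT (by name: the statement is the Claim_ definition above) =====
theorem extract_relevant_info_py_spec : Claim_equal_extract_relevant_info_py := by
  intro context question _
  show extract_relevant_info_py context question = extract_relevant_info_py_alt context question
  exact pvCore ((PySem.Str.split? context "\n").getD [])
    (fun line =>
      ((((PySem.Str.split₀ question).filter (fun w => 3 < PySem.Str.len w)).map
          (fun w => PySem.Str.lower w)).map
        (fun k => if PySem.Str.isIn k (PySem.Str.lower line) then (1 : Int) else 0)).sum)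
    (if 1000 < PySem.Str.len context then PySem.Str.slice context none (some 1000) ++ "..." else context)
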